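-- pv_equiv track=rewrite | github.com/spassignat/james | parsers/parsers/properties_analyzer.py | _categorize_properties
-- ===== SOURCE A (Python) =====
-- from typing import Dict, List, Any
--
-- def _categorize_properties(properties: List[Dict]) -> Dict[str, int]:
--     categories = {
--         'database': 0,
--         'server': 0,
--         'security': 0,
--         'logging': 0,
--         'external_services': 0,
--         'other': 0
--     }
--
--     for prop in properties:
--         key = prop['key'].lower()
--
--         if any(db_word in key for db_word in ['db', 'database', 'jdbc', 'sql']):
--             categories['database'] += 1
--         elif any(server_word in key for server_word in ['server', 'port', 'host', 'url']):
--             categories['server'] += 1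
--         elif any(sec_word in key for sec_word in ['password', 'secret', 'key', 'auth', 'ssl']):
--             categories['security'] += 1
--         elif any(log_word in key for log_word in ['log', 'debug', 'verbose']):
--             categories['logging'] += 1
--         elif any(ext_word in key for ext_word in ['api', 'service', 'endpoint', 'client']):
--             categories['external_services'] += 1
--         else:
--             categories['other'] += 1
--
--     return categories
-- ===== SOURCE B (Python) =====
-- CATEGORY_WORDS = [
--     ('database', ('db', 'database', 'jdbc', 'sql')),
--     ('server', ('server', 'port', 'host', 'url')),
--     ('security', ('password', 'secret', 'key', 'auth', 'ssl')),
--     ('logging', ('log', 'debug', 'verbose')),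
--     ('external_services', ('api', 'service', 'endpoint', 'client')),
-- ]
--
-- def _categorize_properties(properties):
--     # Staged sieve: extract all lowered keys once, then run one filtering
--     # pass per category over the still-unclassified keys; whatever a
--     # category's words match is counted for it and removed, so earlier
--     # categories keep their priority. The leftovers are 'other'.
--     remaining = [prop['key'].lower() for prop in properties]
--     categories = {}
--     for name, words in CATEGORY_WORDS:
--         matched = [k for k in remaining if any(w in k for w in words)]
--         categories[name] = len(matched)
--         remaining = [k for k in remaining if not any(w in k for w in words)]
--     categories['other'] = len(remaining)
--     return categories
-- ===== Notes on version B (the rewrite author's own statement) =====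
-- stated objective: alternative
-- what changed: Instead of classifying each property in one pass through a per-element first-match branch chain, B runs a staged sieve: it extracts all lowered keys once, then makes one filtering pass per category over the shrinking list of unclassified keys, counting and removing matches, with the leftovers counted as 'other'.
import Mathlib
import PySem

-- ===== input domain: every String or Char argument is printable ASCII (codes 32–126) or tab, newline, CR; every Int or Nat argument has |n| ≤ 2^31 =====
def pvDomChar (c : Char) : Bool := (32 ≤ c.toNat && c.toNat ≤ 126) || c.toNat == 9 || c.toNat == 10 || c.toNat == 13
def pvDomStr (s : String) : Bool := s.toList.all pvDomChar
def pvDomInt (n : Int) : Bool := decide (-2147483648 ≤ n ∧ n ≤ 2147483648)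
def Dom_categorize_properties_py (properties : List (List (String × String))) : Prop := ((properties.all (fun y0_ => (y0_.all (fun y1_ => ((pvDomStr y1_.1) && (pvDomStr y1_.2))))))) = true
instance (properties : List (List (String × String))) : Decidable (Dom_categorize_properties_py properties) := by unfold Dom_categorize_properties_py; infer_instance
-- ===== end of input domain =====

-- B replaces A's single per-element first-match pass by a staged sieve (one filtering pass per category over the unclassified keys); return value only.

-- ===== PORT A =====
-- the loop body of A: elif chain over the lowered key, bumping one of six fixed counters
def pvAStep (d : PySem.Dict String Int) (prop : List (String × String)) : PySem.Dict String Int :=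
  match (PySem.Dict.ofList prop).get? "key" with
  | none => d  -- prop['key'] raises KeyError in Python; excluded by Pre_
  | some v =>
    let key := PySem.Str.lower v
    if ["db", "database", "jdbc", "sql"].any (fun w => PySem.Str.isIn w key) then
      d.modify "database" 0 (· + 1)
    else if ["server", "port", "host", "url"].any (fun w => PySem.Str.isIn w key) then
      d.modify "server" 0 (· + 1)
    else if ["password", "secret", "key", "auth", "ssl"].any (fun w => PySem.Str.isIn w key) then
      d.modify "security" 0 (· + 1)
    else if ["log", "debug", "verbose"].any (fun w => PySem.Str.isIn w key) then
      d.modify "logging" 0 (· + 1)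
    else if ["api", "service", "endpoint", "client"].any (fun w => PySem.Str.isIn w key) then
      d.modify "external_services" 0 (· + 1)
    else
      d.modify "other" 0 (· + 1)

def categorize_properties_py (properties : List (List (String × String))) : List (String × Int) :=
  let categories : PySem.Dict String Int :=
    PySem.Dict.ofList [("database", 0), ("server", 0), ("security", 0),
                       ("logging", 0), ("external_services", 0), ("other", 0)]
  (properties.foldl pvAStep categories).items

-- ===== PORT B =====
def pvTable : List (String × List String) :=
  [("database", ["db", "database", "jdbc", "sql"]),
   ("server", ["server", "port", "host", "url"]),
   ("security", ["password", "secret", "key", "auth", "ssl"]),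
   ("logging", ["log", "debug", "verbose"]),
   ("external_services", ["api", "service", "endpoint", "client"])]

-- any(w in k for w in words)
def pvMatch (words : List String) (k : String) : Bool :=
  words.any (fun w => PySem.Str.isIn w k)

-- the per-category sieve loop of B: count and remove matches, leftovers are 'other'
def pvBLoop : List (String × List String) → List String → PySem.Dict String Int → PySem.Dict String Int
  | [], remaining, cats => cats.insert "other" (PySem.List.len remaining)
  | (name, words) :: rest, remaining, cats =>
      pvBLoop rest (remaining.filter (fun k => !pvMatch words k))
        (cats.insert name (PySem.List.len (remaining.filter (fun k => pvMatch words k))))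

def categorize_properties_py_alt (properties : List (List (String × String))) : List (String × Int) :=
  -- [prop['key'].lower() for prop in properties]; a prop without 'key' raises KeyError (excluded by Pre_) and is skipped here
  let remaining := properties.filterMap
    (fun prop => ((PySem.Dict.ofList prop).get? "key").map PySem.Str.lower)
  (pvBLoop pvTable remaining PySem.Dict.empty).items

-- ===== PRECONDITION & SPEC =====
-- Pre_ excludes exactly the inputs where prop['key'] raises KeyError (both A and B raise there).
def Pre_categorize_properties_py (properties : List (List (String × String))) : Prop :=
  ∀ prop ∈ properties, (PySem.Dict.ofList prop).contains "key" = true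
instance (properties : List (List (String × String))) : Decidable (Pre_categorize_properties_py properties) := by unfold Pre_categorize_properties_py; infer_instance
def pvWitness_categorize_properties_py : (List (List (String × String))) :=
  [[("key", "jdbc.url")], [("key", "app.name")]]

def Spec_categorize_properties_py (properties : List (List (String × String))) (out : List (String × Int)) : Prop := out = categorize_properties_py_alt properties
instance (properties : List (List (String × String))) (out : List (String × Int)) : Decidable (Spec_categorize_properties_py properties out) := by unfold Spec_categorize_properties_py; infer_instance

-- ===== CLAIM =====
def Claim_equal_categorize_properties_py : Prop := ∀ (properties : List (List (String × String))), Dom_categorize_properties_py properties → Pre_categorize_properties_py properties → Spec_categorize_properties_py properties (categorize_properties_py properties)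

-- ===== LEMMAS AND PROOFS =====
-- the category A's elif chain assigns to a lowered key (proof-side characterisation of pvAStep)
def pvCatOf (k : String) : String :=
  if pvMatch ["db", "database", "jdbc", "sql"] k then "database"
  else if pvMatch ["server", "port", "host", "url"] k then "server"
  else if pvMatch ["password", "secret", "key", "auth", "ssl"] k then "security"
  else if pvMatch ["log", "debug", "verbose"] k then "logging"
  else if pvMatch ["api", "service", "endpoint", "client"] k then "external_services"
  else "other"

theorem pvAStep_eq (d : PySem.Dict String Int) (prop : List (String × String)) :
    pvAStep d prop = match ((PySem.Dict.ofList prop).get? "key").map PySem.Str.lower with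
      | none => d
      | some k => d.modify (pvCatOf k) 0 (· + 1) := by
  unfold pvAStep pvCatOf pvMatch
  cases (PySem.Dict.ofList prop).get? "key" with
  | none => rfl
  | some v =>
    dsimp only [Option.map]
    split_ifs <;> rfl

theorem pvFoldA_eq (l : List (List (String × String))) (d : PySem.Dict String Int) :
    l.foldl pvAStep d =
      (l.filterMap (fun prop => ((PySem.Dict.ofList prop).get? "key").map PySem.Str.lower)).foldl
        (fun d k => d.modify (pvCatOf k) 0 (· + 1)) d := by
  induction l generalizing d with
  | nil => rfl
  | cons p t ih =>
    rw [List.foldl_cons, pvAStep_eq, List.filterMap_cons]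
    cases ((PySem.Dict.ofList p).get? "key").map PySem.Str.lower with
    | none => exact ih d
    | some k => rw [List.foldl_cons]; exact ih _

theorem pvFoldA_getD (ks : List String) (d : PySem.Dict String Int) (c : String) :
    (ks.foldl (fun d k => d.modify (pvCatOf k) 0 (· + 1)) d).getD c 0
      = d.getD c 0 + ((ks.map pvCatOf).count c : Int) := by
  rw [show (ks.foldl (fun d k => d.modify (pvCatOf k) 0 (· + 1)) d)
        = ((ks.map pvCatOf).foldl (fun d x => d.modify x 0 (· + 1)) d) from
      (List.foldl_map (g := fun (d : PySem.Dict String Int) (x : String) => d.modify x 0 (· + 1))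
        (f := pvCatOf) (l := ks) (init := d)).symm]
  rw [PySem.Dict.getD_foldl_modify_add_one]

theorem pvFoldA_keys (ks : List String) (d : PySem.Dict String Int)
    (h : ∀ k, pvCatOf k ∈ d.keys) :
    (ks.foldl (fun d k => d.modify (pvCatOf k) 0 (· + 1)) d).keys = d.keys := by
  rw [PySem.Dict.keys_foldl_modify_key, PySem.Set.update_eq_append_filter]
  have h2 : (PySem.Set.ofList (ks.map pvCatOf)).filter (fun y => !(PySem.Set.contains d.keys y)) = [] := by
    rw [List.filter_eq_nil_iff]
    intro a ha
    rw [PySem.Set.mem_ofList] at ha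
    have hm : a ∈ ks.map pvCatOf := ha
    obtain ⟨k, _, rfl⟩ := List.mem_map.mp hm
    simp [h k]
  rw [h2, List.append_nil]

theorem categorize_properties_py_spec : Claim_equal_categorize_properties_py := by
  intro properties _ _
  show categorize_properties_py properties = categorize_properties_py_alt properties
  unfold categorize_properties_py categorize_properties_py_alt
  dsimp only
  rw [pvFoldA_eq]
  set ks := properties.filterMap
    (fun prop => ((PySem.Dict.ofList prop).get? "key").map PySem.Str.lower) with hks
  set d0 : PySem.Dict String Int :=
    PySem.Dict.ofList [("database", 0), ("server", 0), ("security", 0),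
                       ("logging", 0), ("external_services", 0), ("other", 0)] with hd0
  -- A's items
  have hkeys : (ks.foldl (fun d k => d.modify (pvCatOf k) 0 (· + 1)) d0).keys = d0.keys := by
    apply pvFoldA_keys
    intro k
    unfold pvCatOf
    split_ifs <;> decide
  have hnodup : (ks.foldl (fun d k => d.modify (pvCatOf k) 0 (· + 1)) d0).keys.Nodup := by
    rw [hkeys]; decide
  rw [PySem.Dict.items_eq_map_keys _ hnodup 0, hkeys]
  -- B's dict unfolds to six fresh inserts
  simp only [pvBLoop, pvTable]
  rw [show (d0.keys) = ["database", "server", "security", "logging", "external_services", "other"] from by decide]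
  simp only [List.map_cons, List.map_nil]
  simp [PySem.Dict.items_insert, PySem.Dict.contains_insert, PySem.Dict.empty]
  refine ⟨?_, ?_, ?_, ?_, ?_, ?_⟩ <;>
  · rw [pvFoldA_getD]
    rw [show d0.getD _ 0 = 0 from by decide, zero_add, ← List.countP_eq_length_filter]
    norm_cast
    rw [List.count, List.countP_map]
    apply List.countP_congr
    intro a _
    cases h1 : pvMatch ["db", "database", "jdbc", "sql"] a <;>
    cases h2 : pvMatch ["server", "port", "host", "url"] a <;>
    cases h3 : pvMatch ["password", "secret", "key", "auth", "ssl"] a <;>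
    cases h4 : pvMatch ["log", "debug", "verbose"] a <;>
    cases h5 : pvMatch ["api", "service", "endpoint", "client"] a <;>
    simp [pvCatOf, Function.comp, h1, h2, h3, h4, h5]
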